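-- pv_equiv track=rewrite | github.com/andeen171/News-Website-Django | news/views.py | SortNews
-- ===== SOURCE A (Python) =====
-- def SortNews(file):
--     newsDict = {}
--     for item in file:
--         item['created'] = item['created'].split()[0]
--     sorted_news = sorted(file, key=lambda i: i['created'], reverse=True)
--     for item in sorted_news:
--         if item['created'] not in newsDict:
--             newsDict[item['created']] = [item]
--         else:
--             newsDict[item['created']].append(item)
--     return newsDict
-- ===== SOURCE B (Python) =====
-- def SortNews(file):
--     # Same in-place truncation of item['created'] as the original.
--     for item in file:
--         item['created'] = item['created'].split()[0]
--     dates = sorted({item['created'] for item in file}, reverse=True)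
--     return {d: [item for item in file if item['created'] == d] for d in dates}
-- ===== Notes on version B (the rewrite author's own statement) =====
-- stated objective: simpler
-- what changed: Instead of sorting the whole item list descending and then folding it into a dict group by group, B collects the distinct truncated dates as a set, sorts only those keys descending, and builds each group with a filter over the file in original order (stability of the sort makes the groups identical).
import Mathlib
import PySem

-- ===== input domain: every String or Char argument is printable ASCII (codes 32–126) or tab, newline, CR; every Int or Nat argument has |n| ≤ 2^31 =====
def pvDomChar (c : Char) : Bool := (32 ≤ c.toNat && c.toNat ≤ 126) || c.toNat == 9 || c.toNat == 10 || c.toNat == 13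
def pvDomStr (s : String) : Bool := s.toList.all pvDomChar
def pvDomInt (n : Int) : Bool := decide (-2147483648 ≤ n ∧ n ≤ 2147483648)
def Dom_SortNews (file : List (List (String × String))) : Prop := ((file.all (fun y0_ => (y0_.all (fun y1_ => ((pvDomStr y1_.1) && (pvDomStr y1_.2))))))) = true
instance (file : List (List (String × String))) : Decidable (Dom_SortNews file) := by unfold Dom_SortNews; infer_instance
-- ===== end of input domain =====

-- B replaces A's sort-the-whole-list-then-group-into-a-dict shape by: collect the distinct
-- truncated dates as a set, sort only those keys descending, and build each group by a filter
-- pass over the (truncated) file in original order (objective: simpler).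
-- Both A and B mutate item['created'] in place exactly the same way; the equivalence proved
-- here is about the RETURN value.

-- ===== PORT A =====
-- shared helpers: in-place truncation item['created'] = item['created'].split()[0] (both Pythons
-- perform it identically) and the key lookup item['created'] used after it
def pvFirstWord (s : String) : String := (PySem.Str.split₀ s).headD ""

def pvTrunc (item : List (String × String)) : PySem.Dict String String :=
  let d := PySem.Dict.ofList item
  d.insert "created" (pvFirstWord (d.getD "created" ""))

def pvKey (d : PySem.Dict String String) : String := d.getD "created" ""

-- the body of A's grouping loop over sorted_news
def pvStep (nd : PySem.Dict String (List (List (String × String))))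
    (item : PySem.Dict String String) : PySem.Dict String (List (List (String × String))) :=
  if nd.contains (pvKey item) = false then
    nd.insert (pvKey item) [item.items]
  else
    nd.insert (pvKey item) (nd.getD (pvKey item) [] ++ [item.items])

def SortNews (file : List (List (String × String))) : List (String × List (List (String × String))) :=
  let file2 := file.map pvTrunc
  let sortedNews := PySem.List.sorted file2 pvKey true
  (sortedNews.foldl pvStep PySem.Dict.empty).items

-- ===== PORT B =====
def SortNews_alt (file : List (List (String × String))) : List (String × List (List (String × String))) :=
  let file2 := file.map pvTrunc
  let dates := PySem.List.sorted (PySem.Set.ofList (file2.map pvKey)) (fun x => x) true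
  dates.map (fun d => (d, (file2.filter (fun i => pvKey i == d)).map PySem.Dict.items))

-- ===== PRECONDITION & SPEC =====
-- Pre_ excludes exactly the inputs where the Python raises: an item without a 'created' key
-- (KeyError) or whose 'created' value has no words, i.e. is empty/whitespace (IndexError on
-- .split()[0]); B raises in the identical truncation loop there too.
def Pre_SortNews (file : List (List (String × String))) : Prop :=
  ∀ item ∈ file,
    ((PySem.Dict.ofList item).get? "created").isSome = true ∧
    PySem.Str.split₀ ((PySem.Dict.ofList item).getD "created" "") ≠ []
instance (file : List (List (String × String))) : Decidable (Pre_SortNews file) := by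
  unfold Pre_SortNews; infer_instance

def pvWitness_SortNews : (List (List (String × String))) :=
  [[("created", "2021-05-01 12:00"), ("title", "hello")],
   [("created", "2021-05-02 09:30"), ("title", "world")]]

def Spec_SortNews (file : List (List (String × String))) (out : List (String × List (List (String × String)))) : Prop := out = SortNews_alt file
instance (file : List (List (String × String))) (out : List (String × List (List (String × String)))) : Decidable (Spec_SortNews file out) := by unfold Spec_SortNews; infer_instance

-- ===== CLAIM (what is proved, stated in full; the proofs are below) =====
def Claim_equal_SortNews : Prop := ∀ (file : List (List (String × String))), Dom_SortNews file → Pre_SortNews file → Spec_SortNews file (SortNews file)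

-- ===== LEMMAS AND PROOFS =====

-- the group that B builds for a date d out of a list M of (truncated) items
def pvGroup (M : List (PySem.Dict String String)) (d : String) : List (List (String × String)) :=
  (M.filter (fun i => pvKey i == d)).map PySem.Dict.items

lemma pvGroup_append (M : List (PySem.Dict String String)) (i : PySem.Dict String String) (d : String) :
    pvGroup (M ++ [i]) d = pvGroup M d ++ (if pvKey i == d then [i.items] else []) := by
  simp only [pvGroup, List.filter_append, List.map_append]
  split <;> simp_all

lemma pvGroup_eq_nil (M : List (PySem.Dict String String)) (d : String)
    (h : d ∉ M.map pvKey) : pvGroup M d = [] := by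
  simp only [pvGroup, List.map_eq_nil_iff, List.filter_eq_nil_iff]
  intro i hi hk
  exact h (List.mem_map.2 ⟨i, hi, by simpa using hk⟩)

-- A's grouping fold over any list M of items, characterised: keys in order of first
-- occurrence, each value the group of its key
lemma pvGroupFold_items (M : List (PySem.Dict String String)) :
    (M.foldl pvStep PySem.Dict.empty).items
      = (PySem.Set.ofList (M.map pvKey)).map (fun d => (d, pvGroup M d)) := by
  induction M using List.reverseRecOn with
  | nil => rfl
  | append_singleton M i ih =>
    rw [List.foldl_append, List.foldl_cons, List.foldl_nil]
    have hkeys : (M.foldl pvStep PySem.Dict.empty).keys = PySem.Set.ofList (M.map pvKey) := by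
      simp only [PySem.Dict.keys, ih, List.map_map]
      exact List.map_id'' (fun _ => rfl) _
    have hnodup : (M.foldl pvStep PySem.Dict.empty).keys.Nodup := by
      rw [hkeys]; exact PySem.Set.nodup_ofList _
    have hofl : PySem.Set.ofList (M.map pvKey ++ [pvKey i])
        = PySem.Set.add (PySem.Set.ofList (M.map pvKey)) (pvKey i) := by
      simp only [PySem.Set.ofList, List.foldl_append, List.foldl_cons, List.foldl_nil]
    by_cases hc : pvKey i ∈ PySem.Set.ofList (M.map pvKey)
    · -- key already present: in-place overwrite with the appended group
      have hcont : (M.foldl pvStep PySem.Dict.empty).contains (pvKey i) = true :=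
        (PySem.Dict.contains_iff_mem_keys _ _).2 (hkeys ▸ hc)
      have hmemit : (pvKey i, pvGroup M (pvKey i)) ∈ (M.foldl pvStep PySem.Dict.empty).items := by
        rw [ih]; exact List.mem_map_of_mem hc
      have hget : (M.foldl pvStep PySem.Dict.empty).getD (pvKey i) [] = pvGroup M (pvKey i) :=
        PySem.Dict.getD_of_mem_items _ hmemit hnodup []
      have hadd : PySem.Set.add (PySem.Set.ofList (M.map pvKey)) (pvKey i)
          = PySem.Set.ofList (M.map pvKey) := by
        unfold PySem.Set.add
        rw [if_pos (show PySem.Set.contains _ _ = true from List.elem_eq_true_of_mem hc)]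
      rw [pvStep, hcont]
      simp only [Bool.true_eq_false, if_false, hget,
        PySem.Dict.items_insert_of_contains _ _ hcont, ih, List.map_map, List.map_append,
        List.map_cons, List.map_nil, hofl, hadd]
      refine List.map_congr_left (fun d hd => ?_)
      by_cases hdk : d = pvKey i
      · subst hdk; simp [pvGroup_append]
      · have h1 : (d == pvKey i) = false := by simpa using hdk
        have h2 : (pvKey i == d) = false := by simpa using Ne.symm hdk
        simp [pvGroup_append, h2, hdk]
    · -- fresh key: appended at the end
      have hcont : (M.foldl pvStep PySem.Dict.empty).contains (pvKey i) = false := by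
        by_contra h
        exact hc (hkeys ▸ (PySem.Dict.contains_iff_mem_keys _ _).1 (by simpa using h))
      have hadd : PySem.Set.add (PySem.Set.ofList (M.map pvKey)) (pvKey i)
          = PySem.Set.ofList (M.map pvKey) ++ [pvKey i] := by
        unfold PySem.Set.add
        rw [if_neg]
        intro h
        exact hc (by simpa [PySem.Set.contains] using h)
      have hnotM : pvKey i ∉ M.map pvKey := fun h => hc ((PySem.Set.mem_ofList _ _).2 h)
      rw [pvStep, hcont]
      simp only [if_true, PySem.Dict.items_insert_of_not_contains _ _ hcont, ih, List.map_append,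
        List.map_cons, List.map_nil, hofl, hadd]
      congr 1
      · refine List.map_congr_left (fun d hd => ?_)
        have hdk : (pvKey i == d) = false := by
          simp only [beq_eq_false_iff_ne, ne_eq]
          rintro rfl
          exact hc hd
        simp [pvGroup_append, hdk]
      · simp [pvGroup_append, pvGroup_eq_nil M _ hnotM]

-- stability of A's reverse sort: the items of any one key keep their original order,
-- so filtering the sorted list by a key equals filtering the original list
lemma pvInsertBy_pairwise (x : PySem.Dict String String) (acc : List (PySem.Dict String String))
    (h : acc.Pairwise (fun a b => pvKey b ≤ pvKey a)) :
    (PySem.List.insertBy (fun a b => decide (pvKey b < pvKey a)) x acc).Pairwise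
      (fun a b => pvKey b ≤ pvKey a) := by
  induction acc with
  | nil => simp [PySem.List.insertBy]
  | cons y ys ihy =>
    rw [PySem.List.insertBy]
    rcases List.pairwise_cons.1 h with ⟨hy, hys⟩
    by_cases hlt : pvKey y < pvKey x
    · simp only [hlt, decide_true, if_true]
      refine List.pairwise_cons.2 ⟨?_, h⟩
      intro z hz
      rcases List.mem_cons.1 hz with rfl | hz'
      · exact le_of_lt hlt
      · exact le_trans (hy z hz') (le_of_lt hlt)
    · simp only [hlt, decide_false, Bool.false_eq_true, if_false]
      refine List.pairwise_cons.2 ⟨?_, ihy hys⟩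
      intro z hz
      rcases (PySem.List.mem_insertBy _ _ _ _).1 hz with rfl | hz'
      · exact le_of_not_gt hlt
      · exact hy z hz'

lemma pvInsertBy_filter (x : PySem.Dict String String) (acc : List (PySem.Dict String String))
    (d : String) (h : acc.Pairwise (fun a b => pvKey b ≤ pvKey a)) :
    (PySem.List.insertBy (fun a b => decide (pvKey b < pvKey a)) x acc).filter
        (fun i => pvKey i == d)
      = acc.filter (fun i => pvKey i == d) ++ (if pvKey x == d then [x] else []) := by
  induction acc with
  | nil =>
    simp only [PySem.List.insertBy, List.filter_cons, List.filter_nil, List.nil_append]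
  | cons y ys ihy =>
    rw [PySem.List.insertBy]
    rcases List.pairwise_cons.1 h with ⟨hy, hys⟩
    by_cases hlt : pvKey y < pvKey x
    · simp only [hlt, decide_true, if_true]
      by_cases hxd : pvKey x = d
      · -- every key in y :: ys is < pvKey x = d, so the old filter is empty
        have hemp : (y :: ys).filter (fun i => pvKey i == d) = [] := by
          rw [List.filter_eq_nil_iff]
          intro z hz
          have hzy : pvKey z ≤ pvKey y := by
            rcases List.mem_cons.1 hz with rfl | hz'
            · exact le_refl _
            · exact hy z hz'
          have : pvKey z < d := lt_of_le_of_lt hzy (hxd ▸ hlt)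
          simp [ne_of_lt this]
        have hyd : (pvKey y == d) = false := by
          have := List.filter_eq_nil_iff.1 hemp y (List.mem_cons_self)
          simpa using this
        have hemp' : ys.filter (fun i => pvKey i == d) = [] := by
          rw [List.filter_eq_nil_iff] at hemp ⊢
          exact fun z hz => hemp z (List.mem_cons_of_mem _ hz)
        simp [hxd, hemp', hyd]
      · have hxd' : (pvKey x == d) = false := by simpa using hxd
        simp [List.filter_cons, hxd']
    · simp only [hlt, decide_false, Bool.false_eq_true, if_false]
      rw [List.filter_cons, List.filter_cons, ihy hys]
      split
      · simp
      · rfl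
lemma pvFoldl_insertBy_filter (L : List (PySem.Dict String String)) (d : String) :
    ∀ acc, acc.Pairwise (fun a b => pvKey b ≤ pvKey a) →
      (L.foldl (fun acc x => PySem.List.insertBy (fun a b => decide (pvKey b < pvKey a)) x acc) acc).filter
          (fun i => pvKey i == d)
        = acc.filter (fun i => pvKey i == d) ++ L.filter (fun i => pvKey i == d) := by
  induction L with
  | nil => intro acc _; simp
  | cons x L ihL =>
    intro acc hacc
    rw [List.foldl_cons, ihL _ (pvInsertBy_pairwise x acc hacc), pvInsertBy_filter x acc d hacc,
      List.filter_cons]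
    split
    · simp
    · simp

lemma pvSorted_filter (L : List (PySem.Dict String String)) (d : String) :
    (PySem.List.sorted L pvKey true).filter (fun i => pvKey i == d)
      = L.filter (fun i => pvKey i == d) := by
  rw [PySem.List.sorted_rev_eq_foldl_insertBy, pvFoldl_insertBy_filter L d [] (by simp)]
  simp

-- PySem.Set.ofList keeps a sublist of its input
lemma pvFoldl_add_sublist {α : Type} [BEq α] (xs : List α) :
    ∀ s : List α, ∃ t, List.foldl PySem.Set.add s xs = s ++ t ∧ t.Sublist xs := by
  induction xs with
  | nil => intro s; exact ⟨[], by simp⟩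
  | cons x xs ihx =>
    intro s
    rw [List.foldl_cons]
    by_cases hc : PySem.Set.contains s x = true
    · have : PySem.Set.add s x = s := by unfold PySem.Set.add; rw [if_pos hc]
      rw [this]
      rcases ihx s with ⟨t, ht, hs⟩
      exact ⟨t, ht, hs.cons _⟩
    · have : PySem.Set.add s x = s ++ [x] := by
        unfold PySem.Set.add; rw [if_neg hc]
      rw [this]
      rcases ihx (s ++ [x]) with ⟨t, ht, hs⟩
      exact ⟨x :: t, by simpa using ht, hs.cons₂ _⟩

lemma pvOfList_sublist {α : Type} [BEq α] (xs : List α) :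
    (PySem.Set.ofList xs).Sublist xs := by
  rcases pvFoldl_add_sublist xs [] with ⟨t, ht, hs⟩
  simpa [PySem.Set.ofList, ht] using hs

-- the distinct keys of the reverse-sorted list, in order, ARE the distinct keys of the
-- original list sorted descending
lemma pvDates_eq (L : List (PySem.Dict String String)) :
    PySem.Set.ofList ((PySem.List.sorted L pvKey true).map pvKey)
      = PySem.List.sorted (PySem.Set.ofList (L.map pvKey)) (fun x => x) true := by
  apply (PySem.List.sorted_rev_eq_of_perm_of_pairwise_gt _ _ _ _ _).symm
  · refine (List.perm_ext_iff_of_nodup (PySem.Set.nodup_ofList _) (PySem.Set.nodup_ofList _)).2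
      (fun a => ?_)
    rw [PySem.Set.mem_ofList, PySem.Set.mem_ofList, List.mem_map, List.mem_map]
    constructor <;> rintro ⟨i, hi, rfl⟩
    · exact ⟨i, (PySem.List.mem_sorted _ _ _ _).1 hi, rfl⟩
    · exact ⟨i, (PySem.List.mem_sorted _ _ _ _).2 hi, rfl⟩
  · have hge : ((PySem.List.sorted L pvKey true).map pvKey).Pairwise (fun a b => b ≤ a) :=
      List.pairwise_map.2 (PySem.List.sorted_pairwise_rev L pvKey)
    have h1 := List.Pairwise.sublist (pvOfList_sublist ((PySem.List.sorted L pvKey true).map pvKey)) hge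
    have h2 := PySem.Set.nodup_ofList ((PySem.List.sorted L pvKey true).map pvKey)
    refine (h1.and h2).imp ?_
    rintro a b ⟨hle, hne⟩
    exact lt_of_le_of_ne hle (fun h => hne h.symm)

-- ===== VERDICT (by name: the statement is the Claim_ definition above) =====
theorem SortNews_spec : Claim_equal_SortNews := by
  intro file _ _
  unfold Spec_SortNews SortNews SortNews_alt
  rw [pvGroupFold_items, pvDates_eq]
  refine List.map_congr_left (fun d _ => ?_)
  simp only [pvGroup, pvSorted_filter]
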